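-- pv_equiv track=rewrite | github.com/joellijo32/ATP-Lab-Works | Q28EvenOddListMerge.py | seperator
-- ===== SOURCE A (Python) =====
-- def seperator(list_1, list_2):
--     odd_list = []
--     even_list = []
--
--     iterating_list = list_1 + list_2
--     # Seperating Even and Odd
--
--     for i in iterating_list :
--         if i%2 == 0:
--             even_list.append(i)
--         else:
--             odd_list.append(i)
--     # Sorting
--
--     odd_list.sort()
--     even_list.sort()
--
--     # Merging
--
--     return even_list + odd_list
-- ===== SOURCE B (Python) =====
-- def seperator(list_1, list_2):
--     return sorted(list_1 + list_2, key=lambda x: (x % 2, x))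
-- ===== Notes on version B (the rewrite author's own statement) =====
-- stated objective: simpler
-- what changed: A partitions the concatenation into even and odd lists and sorts each separately; B has no partition step at all: one sort of the whole concatenation under the composite key (x % 2, x) puts evens (sorted) before odds (sorted).
import Mathlib
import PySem

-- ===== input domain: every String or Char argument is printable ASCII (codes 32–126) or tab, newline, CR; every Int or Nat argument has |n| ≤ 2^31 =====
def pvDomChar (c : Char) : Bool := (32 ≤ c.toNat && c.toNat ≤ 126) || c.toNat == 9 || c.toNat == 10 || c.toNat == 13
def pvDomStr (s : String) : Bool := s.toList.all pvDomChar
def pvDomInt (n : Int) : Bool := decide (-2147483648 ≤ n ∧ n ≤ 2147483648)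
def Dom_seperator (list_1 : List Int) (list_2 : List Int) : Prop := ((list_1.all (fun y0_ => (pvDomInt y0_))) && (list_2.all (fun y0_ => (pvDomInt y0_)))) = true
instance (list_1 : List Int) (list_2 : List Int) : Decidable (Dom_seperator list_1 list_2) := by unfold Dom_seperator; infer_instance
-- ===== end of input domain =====

-- B replaces A's partition-then-two-sorts with a single sort under the composite key (x % 2, x); same return values.

-- ===== PORT A =====
-- for i in iterating_list: append to even_list / odd_list; then sort each and concatenate
def seperator (list_1 : List Int) (list_2 : List Int) : List Int :=
  let iterating_list := list_1 ++ list_2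
  let p := iterating_list.foldl
    (fun (acc : List Int × List Int) i =>
      if PySem.Int.mod i 2 == 0 then (acc.1 ++ [i], acc.2) else (acc.1, acc.2 ++ [i]))
    ([], [])
  PySem.List.sorted p.1 (fun x => x) false ++ PySem.List.sorted p.2 (fun x => x) false

-- ===== PORT B =====
-- return sorted(list_1 + list_2, key=lambda x: (x % 2, x))
def seperator_alt (list_1 : List Int) (list_2 : List Int) : List Int :=
  PySem.List.sorted2 (list_1 ++ list_2) (fun x => PySem.Int.mod x 2) (fun x => x) false

-- ===== PRECONDITION & SPEC =====
def Spec_seperator (list_1 : List Int) (list_2 : List Int) (out : List Int) : Prop := out = seperator_alt list_1 list_2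
instance (list_1 : List Int) (list_2 : List Int) (out : List Int) : Decidable (Spec_seperator list_1 list_2 out) := by unfold Spec_seperator; infer_instance

-- ===== CLAIM (what is proved, stated in full; the proofs are below) =====
def Claim_equal_seperator : Prop := ∀ (list_1 : List Int) (list_2 : List Int), Dom_seperator list_1 list_2 → Spec_seperator list_1 list_2 (seperator list_1 list_2)

-- ===== LEMMAS AND PROOFS =====

-- the strict comparison sorted2 uses for key (x % 2, x)
def pvLtb (a b : Int) : Bool :=
  decide (PySem.Int.mod a 2 < PySem.Int.mod b 2) ||
    (!decide (PySem.Int.mod b 2 < PySem.Int.mod a 2) && decide (a < b))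

-- the corresponding non-strict order ("a comes no later than b")
def pvR (a b : Int) : Prop := pvLtb b a = false

theorem pvLtb_iff (a b : Int) :
    pvLtb a b = true ↔ (a % 2 < b % 2 ∨ (¬ b % 2 < a % 2 ∧ a < b)) := by
  simp [pvLtb, PySem.Int.mod, Int.fmod_eq_emod]

theorem pvR_iff (a b : Int) : pvR a b ↔ (a % 2 ≤ b % 2 ∧ (b % 2 ≤ a % 2 → a ≤ b)) := by
  simp [pvR, pvLtb, PySem.Int.mod, Int.fmod_eq_emod]

theorem pvR_antisymm (a b : Int) : pvR a b → pvR b a → a = b := by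
  simp only [pvR_iff]; omega

-- insertBy with pvLtb preserves Pairwise pvR
theorem pvInsertBy_pairwise (x : Int) (ys : List Int) (h : ys.Pairwise pvR) :
    (PySem.List.insertBy pvLtb x ys).Pairwise pvR := by
  induction ys with
  | nil => simp [PySem.List.insertBy]
  | cons y ys ih =>
    rcases List.pairwise_cons.mp h with ⟨hy, hys⟩
    by_cases hxy : pvLtb x y = true
    · rw [PySem.List.insertBy, if_pos hxy]
      refine List.pairwise_cons.mpr ⟨?_, h⟩
      intro z hz
      rcases List.mem_cons.mp hz with rfl | hz
      · -- pvR x z for z = y: from pvLtb x y = true by asymmetry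
        rw [pvLtb_iff] at hxy
        rw [pvR_iff]
        omega
      · -- z in ys: pvR y z and pvLtb x y give pvR x z
        have hyz := hy z hz
        rw [pvLtb_iff] at hxy
        rw [pvR_iff] at hyz ⊢
        omega
    · rw [PySem.List.insertBy, if_neg hxy]
      refine List.pairwise_cons.mpr ⟨?_, ih hys⟩
      intro z hz
      rcases (PySem.List.mem_insertBy _ _ _ _).mp hz with rfl | hz
      · exact (Bool.not_eq_true _).mp hxy
      · exact hy z hz

-- sorted2 with keys (x % 2, x) produces a Pairwise-pvR list
theorem pvSorted2_pairwise (xs : List Int) :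
    (PySem.List.sorted2 xs (fun x => PySem.Int.mod x 2) (fun x => x) false).Pairwise pvR := by
  have : ∀ acc : List Int, acc.Pairwise pvR →
      (xs.foldl (fun acc x => PySem.List.insertBy pvLtb x acc) acc).Pairwise pvR := by
    induction xs with
    | nil => intro acc h; simpa using h
    | cons x xs ih => intro acc h; exact ih _ (pvInsertBy_pairwise x acc h)
  unfold PySem.List.sorted2
  exact this [] List.Pairwise.nil

-- A's partition loop collects exactly the two filters of the traversed list.
theorem pvFoldl_partition (p : Int → Bool) (c : List Int) (e o : List Int) :
    c.foldl (fun (acc : List Int × List Int) i =>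
      if p i then (acc.1 ++ [i], acc.2) else (acc.1, acc.2 ++ [i])) (e, o)
    = (e ++ c.filter p, o ++ c.filter (fun x => !(p x))) := by
  induction c generalizing e o with
  | nil => simp
  | cons x xs ih =>
    by_cases h : p x <;> simp [List.foldl, h, ih, List.filter]

-- A's output (sorted evens ++ sorted odds) is Pairwise pvR
theorem pvA_pairwise (c : List Int) :
    (PySem.List.sorted (c.filter (fun i => PySem.Int.mod i 2 == 0)) (fun x => x) false ++
     PySem.List.sorted (c.filter (fun i => !(PySem.Int.mod i 2 == 0))) (fun x => x) false).Pairwise pvR := by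
  have he : ∀ a ∈ PySem.List.sorted (c.filter (fun i => PySem.Int.mod i 2 == 0)) (fun x => x) false,
      a % 2 = 0 := by
    intro a ha
    have := List.of_mem_filter ((PySem.List.mem_sorted _ _ _ _).mp ha)
    simpa [PySem.Int.mod, Int.fmod_eq_emod] using this
  have ho : ∀ a ∈ PySem.List.sorted (c.filter (fun i => !(PySem.Int.mod i 2 == 0))) (fun x => x) false,
      a % 2 = 1 := by
    intro a ha
    have := List.of_mem_filter ((PySem.List.mem_sorted _ _ _ _).mp ha)
    simp only [Bool.not_eq_eq_eq_not, Bool.not_true, beq_eq_false_iff_ne, ne_eq,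
      PySem.Int.mod, Int.fmod_eq_emod] at this
    omega
  refine List.pairwise_append.mpr ⟨?_, ?_, ?_⟩
  · refine (PySem.List.sorted_pairwise _ (fun x => x)).imp_of_mem ?_
    intro a b ha hb hab
    have h1 := he a ha; have h2 := he b hb
    rw [pvR_iff]; omega
  · refine (PySem.List.sorted_pairwise _ (fun x => x)).imp_of_mem ?_
    intro a b ha hb hab
    have h1 := ho a ha; have h2 := ho b hb
    rw [pvR_iff]; omega
  · intro a ha b hb
    have h1 := he a ha
    have h2 := ho b hb
    rw [pvR_iff]; omega

-- ===== VERDICT (by name: the statement is the Claim_ definition above) =====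
theorem seperator_spec : Claim_equal_seperator := by
  intro list_1 list_2 _
  unfold Spec_seperator seperator seperator_alt
  simp only [pvFoldl_partition, List.nil_append]
  set c := list_1 ++ list_2 with hc
  apply List.Perm.eq_of_pairwise (le := pvR)
  · intro a b _ _ h1 h2; exact pvR_antisymm a b h1 h2
  · exact pvA_pairwise c
  · exact pvSorted2_pairwise c
  · refine List.Perm.trans ?_ (PySem.List.sorted2_perm c _ _ false).symm
    refine List.Perm.trans (List.Perm.append (PySem.List.sorted_perm _ _ _) (PySem.List.sorted_perm _ _ _)) ?_
    exact List.filter_append_perm _ c
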